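-- pv_equiv track=rewrite | github.com/aamishhussain23/test | main.py | format_keys
-- ===== SOURCE A (Python) =====
-- def format_keys(keys_dict):
--     max_len = max(len(keys) for keys in keys_dict)
--     formatted_keys = []
--     for keys in keys_dict:
--         while len(keys) < max_len:
--             keys.append('')
--         formatted_keys.append(keys)
--     keys = formatted_keys
--     y1 = 0
--     while y1<len(keys[0]):
--         y2 = 0
--         counter = 0
--         while y2<len(keys):
--             if keys[y2][y1]=='':
--                 counter = counter+1
--             y2 = y2 + 1
--         if counter==len(keys):
--             keys = [[row[i] for i in range(len(row)) if i != y1] for row in keys]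
--         else:
--             y1 = y1 + 1
--     return keys
-- ===== SOURCE B (Python) =====
-- def format_keys(keys_dict):
--     max_len = max(len(r) for r in keys_dict)
--     rows = [r + [''] * (max_len - len(r)) for r in keys_dict]
--     keep = [j for j in range(max_len) if any(row[j] != '' for row in rows)]
--     return [[row[j] for j in keep] for row in rows]
-- ===== Notes on version B (the rewrite author's own statement) =====
-- stated objective: faster
-- what changed: Replaces A's repeated whole-matrix rebuilds (one per all-empty column, each copying every row) with a single pass that computes the set of kept column indices once and rebuilds the rows once.
import Mathlib
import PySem

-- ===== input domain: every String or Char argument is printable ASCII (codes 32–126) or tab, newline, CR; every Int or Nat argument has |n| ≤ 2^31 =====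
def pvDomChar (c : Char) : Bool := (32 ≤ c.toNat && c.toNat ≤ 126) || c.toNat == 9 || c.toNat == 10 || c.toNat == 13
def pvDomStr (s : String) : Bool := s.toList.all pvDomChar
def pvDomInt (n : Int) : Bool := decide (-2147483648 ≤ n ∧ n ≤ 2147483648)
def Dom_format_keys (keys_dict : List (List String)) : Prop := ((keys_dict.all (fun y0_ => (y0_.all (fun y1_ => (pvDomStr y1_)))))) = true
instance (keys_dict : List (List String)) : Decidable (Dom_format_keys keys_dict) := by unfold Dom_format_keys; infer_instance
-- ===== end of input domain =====

-- B replaces A's repeated whole-matrix rebuilds (one per all-empty column) with a single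
-- pass computing the kept column indices, then one rebuild. Return-value equivalence only:
-- A mutates its argument's rows in place (appends '' padding); B does not.
-- Note: in both ports the Python `max(...)` over the (nonempty, by Pre_) list of row
-- lengths is ported as `foldl Nat.max 0`, which equals Python's max on any nonempty
-- list of Nats.

-- ===== PORT A =====
-- lemma used by loopA's termination (cited in decreasing_by), so it stays above the port
theorem pv_filter_ne_len_lt {y1 n : Nat} (h : y1 < n) :
    (((List.range n).filter (fun i => i ≠ y1)).length) < n := by
  have hmem : y1 ∈ List.range n := List.mem_range.mpr h
  calc ((List.range n).filter (fun i => i ≠ y1)).length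
      < (List.range n).length := by
        refine List.length_filter_lt_length_iff_exists.mpr ?_
        exact ⟨y1, hmem, by simp⟩
    _ = n := List.length_range ..

-- the padding while-loop: `while len(keys) < max_len: keys.append('')`
def padRow (keys : List String) (max_len : Nat) : List String :=
  if keys.length < max_len then padRow (keys ++ [""]) max_len else keys
termination_by max_len - keys.length
decreasing_by simp; omega

-- the outer while-loop over y1; the inner counting while-loop over y2 is the countP,
-- the comprehension `[[row[i] for i in range(len(row)) if i != y1] for row in keys]`
-- is the map/filter below. `row[i]` is in range, ported as getD.
def loopA (keys : List (List String)) (y1 : Nat) : List (List String) :=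
  if h : y1 < (keys.headD []).length then
    let counter := keys.countP (fun row => row.getD y1 "" = "")
    if counter = keys.length then
      loopA (keys.map (fun row => ((List.range row.length).filter (fun i => i ≠ y1)).map (fun i => row.getD i ""))) y1
    else
      loopA keys (y1 + 1)
  else keys
termination_by (keys.headD []).length - y1
decreasing_by
  · cases keys with
    | nil => exact absurd h (by simp)
    | cons r t =>
        simp only [List.headD_cons] at h
        simp
        have := pv_filter_ne_len_lt h
        simp only [ne_eq, decide_not] at this
        omega
  · omega

def format_keys (keys_dict : List (List String)) : List (List String) :=
  -- max(len(keys) for keys in keys_dict); Python raises on [] (excluded by Pre_)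
  let max_len := (keys_dict.map List.length).foldl Nat.max 0
  let formatted_keys := keys_dict.map (fun keys => padRow keys max_len)
  loopA formatted_keys 0

-- ===== PORT B =====
def format_keys_alt (keys_dict : List (List String)) : List (List String) :=
  let max_len := (keys_dict.map List.length).foldl Nat.max 0
  let rows := keys_dict.map (fun r => r ++ List.replicate (max_len - r.length) "")
  let keep := (List.range max_len).filter (fun j => rows.any (fun row => row.getD j "" ≠ ""))
  rows.map (fun row => keep.map (fun j => row.getD j ""))

-- ===== PRECONDITION & SPEC =====
-- Pre_ excludes only the empty outer list, where Python's max() over no row lengths raises ValueError in A and in B alike.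
def Pre_format_keys (keys_dict : List (List String)) : Prop := keys_dict ≠ []
instance (keys_dict : List (List String)) : Decidable (Pre_format_keys keys_dict) := by unfold Pre_format_keys; infer_instance
def pvWitness_format_keys : List (List String) := [["a", ""], [""]]

def Spec_format_keys (keys_dict : List (List String)) (out : List (List String)) : Prop := out = format_keys_alt keys_dict
instance (keys_dict : List (List String)) (out : List (List String)) : Decidable (Spec_format_keys keys_dict out) := by unfold Spec_format_keys; infer_instance

-- ===== CLAIM (what is proved, stated in full; the proofs are below) =====
def Claim_equal_format_keys : Prop := ∀ (keys_dict : List (List String)), Dom_format_keys keys_dict → Pre_format_keys keys_dict → Spec_format_keys keys_dict (format_keys keys_dict)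

-- ===== LEMMAS AND PROOFS =====

-- column j is all-empty
def colEmpty (rows : List (List String)) (j : Nat) : Bool :=
  rows.all (fun r => r.getD j "" == "")

theorem pv_proj_range {α : Type} (M : List α) (d : α) :
    (List.range M.length).map (fun i => M.getD i d) = M := by
  apply List.ext_getElem
  · simp
  · intro i h1 h2
    simp_all [List.getD_eq_getElem?_getD]

theorem pv_proj_erase {α : Type} (M : List α) (d : α) (y1 : Nat) :
    ((List.range M.length).filter (fun i => i ≠ y1)).map (fun i => M.getD i d)
      = M.eraseIdx y1 := by
  induction M generalizing y1 with
  | nil => simp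
  | cons a M ih =>
    rw [List.length_cons, List.range_succ_eq_map]
    cases y1 with
    | zero =>
      simp only [List.eraseIdx_zero, List.filter_cons]
      simp only [decide_eq_true_eq]
      rw [if_neg (by simp)]
      rw [List.filter_map, List.map_map]
      have : (List.range M.length).filter ((fun i => decide (i ≠ 0)) ∘ Nat.succ) = List.range M.length := by
        apply List.filter_eq_self.mpr; intro x _; simp
      rw [this]
      have : ((fun i => (a :: M).getD i d) ∘ Nat.succ) = (fun i => M.getD i d) := by
        funext i; simp
      rw [this]
      simpa using pv_proj_range M d
    | succ y =>
      simp only [List.eraseIdx_cons_succ, List.filter_cons]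
      rw [if_pos (by simp)]
      rw [List.map_cons, List.filter_map, List.map_map]
      have h1 : (List.range M.length).filter ((fun i => decide (i ≠ y + 1)) ∘ Nat.succ)
          = (List.range M.length).filter (fun i => i ≠ y) := by
        apply List.filter_congr; intro x _; simp
      have h2 : ((fun i => (a :: M).getD i d) ∘ Nat.succ) = (fun i => M.getD i d) := by
        funext i; simp
      rw [h1, h2]
      simp only [List.getD_cons_zero]
      rw [ih y]

theorem pv_getD_map {α β : Type} (K : List α) (f : α → β) (y : Nat) (d : β) (h : y < K.length) :
    (K.map f).getD y d = f K[y] := by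
  simp [List.getD_eq_getElem?_getD, h]

-- main loop invariant: running loopA on the projection of `orig` onto columns K,
-- with columns before y1 already validated, keeps exactly the non-all-empty columns of K from y1 on
theorem pv_loopA_proj (n : Nat) : ∀ (orig : List (List String)) (K : List Nat) (y1 : Nat),
    K.length - y1 ≤ n →
    loopA (orig.map (fun r => K.map (fun j => r.getD j ""))) y1
      = orig.map (fun r =>
          (K.take y1 ++ (K.drop y1).filter (fun j => !colEmpty orig j)).map (fun j => r.getD j "")) := by
  induction n with
  | zero =>
    intro orig K y1 hn
    have hK : K.length ≤ y1 := by omega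
    rw [loopA]
    rw [dif_neg ?_]
    · rw [List.take_of_length_le hK, List.drop_eq_nil_of_le hK]
      simp
    · cases orig with
      | nil => simp
      | cons r t => simp; omega
  | succ n ih =>
    intro orig K y1 hn
    by_cases hK : y1 < K.length
    case neg =>
      rw [loopA, dif_neg ?_]
      · rw [List.take_of_length_le (by omega), List.drop_eq_nil_of_le (by omega)]
        simp
      · cases orig with
        | nil => simp
        | cons r t => simp; omega
    case pos =>
      cases orig with
      | nil =>
        rw [loopA, dif_neg (by simp)]; simp
      | cons r0 rest =>
        set orig := r0 :: rest with horig
        have hhead : ((orig.map fun r => K.map fun j => r.getD j "").headD []).length = K.length := by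
          simp [horig]
        rw [loopA, dif_pos (by rw [hhead]; exact hK)]
        have hcnt : ((orig.map fun r => K.map fun j => r.getD j "").countP
              (fun row => row.getD y1 "" = "")
            = (orig.map fun r => K.map fun j => r.getD j "").length)
            ↔ colEmpty orig K[y1] = true := by
          rw [List.countP_map, List.length_map]
          rw [List.countP_eq_length]
          constructor
          · intro h
            simp only [colEmpty, List.all_eq_true]
            intro r hr
            have := h r hr
            simp only [Function.comp] at this
            rw [pv_getD_map K _ y1 "" hK] at this
            simpa using this
          · intro h r hr
            simp only [colEmpty, List.all_eq_true] at h
            have := h r hr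
            simp only [Function.comp]
            rw [pv_getD_map K _ y1 "" hK]
            simpa using this
        have hdrop : K.drop y1 = K[y1] :: K.drop (y1 + 1) := List.drop_eq_getElem_cons hK
        by_cases hce : colEmpty orig K[y1] = true
        case pos =>
          rw [if_pos (hcnt.mpr hce)]
          -- the rebuilt matrix is orig projected onto K.eraseIdx y1
          have hrw : ((orig.map fun r => K.map fun j => r.getD j "").map
                (fun row => ((List.range row.length).filter (fun i => i ≠ y1)).map (fun i => row.getD i "")))
              = orig.map (fun r => (K.eraseIdx y1).map (fun j => r.getD j "")) := by
            rw [List.map_map]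
            apply List.map_congr_left
            intro r _
            simp only [Function.comp]
            rw [pv_proj_erase]
            rw [List.eraseIdx_eq_take_drop_succ, List.eraseIdx_eq_take_drop_succ,
                List.map_append, List.map_take, List.map_drop]
          rw [hrw]
          have hlen : (K.eraseIdx y1).length - y1 ≤ n := by
            rw [List.length_eraseIdx_of_lt hK]; omega
          rw [ih orig (K.eraseIdx y1) y1 hlen]
          have hKs : (K.eraseIdx y1).take y1 ++ ((K.eraseIdx y1).drop y1).filter (fun j => !colEmpty orig j)
              = K.take y1 ++ (K.drop y1).filter (fun j => !colEmpty orig j) := by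
            rw [List.eraseIdx_eq_take_drop_succ]
            have htk : (K.take y1).length = y1 := List.length_take_of_le (by omega)
            rw [List.take_left' htk, List.drop_left' htk]
            rw [hdrop, List.filter_cons, if_neg (by simp [hce])]
          simp only [hKs]
        case neg =>
          rw [if_neg (fun h => hce (hcnt.mp h))]
          rw [ih orig K (y1 + 1) (by omega)]
          have hKs : K.take (y1 + 1) ++ (K.drop (y1 + 1)).filter (fun j => !colEmpty orig j)
              = K.take y1 ++ (K.drop y1).filter (fun j => !colEmpty orig j) := by
            rw [hdrop, List.filter_cons, if_pos (by simp [hce])]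
            rw [← List.singleton_append, ← List.append_assoc]
            congr 1
            rw [List.take_add_one, List.getElem?_eq_getElem hK]
            rfl
          simp only [hKs]

theorem pv_padRow_eq (L : Nat) (n : Nat) : ∀ (keys : List String), L - keys.length ≤ n →
    padRow keys L = keys ++ List.replicate (L - keys.length) "" := by
  induction n with
  | zero =>
    intro keys hn
    rw [padRow, if_neg (by omega)]
    have h0 : L - keys.length = 0 := by omega
    simp [h0]
  | succ n ih =>
    intro keys hn
    by_cases h : keys.length < L
    · rw [padRow, if_pos h]
      rw [ih (keys ++ [""]) (by simp; omega)]
      have h1 : L - keys.length = (L - (keys ++ [""]).length) + 1 := by simp; omega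
      rw [h1, List.append_assoc]
      congr 1
    · rw [padRow, if_neg h]
      have h0 : L - keys.length = 0 := by omega
      simp [h0]

theorem pv_foldl_max_init (l : List Nat) : ∀ a, a ≤ l.foldl Nat.max a := by
  induction l with
  | nil => intro a; simp
  | cons b t ih => intro a; exact le_trans (Nat.le_max_left a b) (ih _)

theorem pv_le_foldl_max (l : List Nat) : ∀ (a x : Nat), x ∈ l → x ≤ l.foldl Nat.max a := by
  induction l with
  | nil => intro a x hx; simp at hx
  | cons b t ih =>
    intro a x hx
    rcases List.mem_cons.mp hx with h | h
    · subst h; exact le_trans (Nat.le_max_right a x) (pv_foldl_max_init t _)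
    · exact ih _ _ h

-- ===== VERDICT (by name: the statement is the Claim_ definition above) =====
theorem format_keys_spec : Claim_equal_format_keys := by
  intro keys_dict _ hpre
  unfold Spec_format_keys format_keys format_keys_alt
  set L := (keys_dict.map List.length).foldl Nat.max 0 with hL
  set rows := keys_dict.map (fun r => r ++ List.replicate (L - r.length) "") with hrowsdef
  show loopA (keys_dict.map (fun keys => padRow keys L)) 0
      = rows.map (fun row =>
          ((List.range L).filter (fun j => rows.any (fun row => row.getD j "" ≠ ""))).map
            (fun j => row.getD j ""))
  have hrows : keys_dict.map (fun keys => padRow keys L) = rows := by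
    rw [hrowsdef]
    apply List.map_congr_left
    intro r _
    exact pv_padRow_eq L L r (by omega)
  rw [hrows]
  have hlen : ∀ r ∈ rows, r.length = L := by
    intro r hr
    rw [hrowsdef] at hr
    rcases List.mem_map.mp hr with ⟨s, hs, rfl⟩
    have : s.length ≤ L := pv_le_foldl_max _ 0 s.length (List.mem_map_of_mem hs)
    simp
    omega
  have hproj : rows = rows.map (fun r => (List.range L).map (fun j => r.getD j "")) := by
    conv_lhs => rw [← List.map_id rows]
    apply List.map_congr_left
    intro r hr
    have := pv_proj_range r ""
    rw [hlen r hr] at this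
    simpa using this.symm
  conv_lhs => rw [hproj]
  rw [pv_loopA_proj ((List.range L).length) rows (List.range L) 0 (by omega)]
  have hfil : (List.range L).filter (fun j => !colEmpty rows j)
      = (List.range L).filter (fun j => rows.any (fun row => decide (row.getD j "" ≠ ""))) := by
    apply List.filter_congr
    intro j _
    rw [colEmpty, Bool.eq_iff_iff]
    simp [List.any_eq_true]
  simp only [List.take_zero, List.drop_zero, List.nil_append, hfil]
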